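-- pv_equiv track=rewrite | github.com/tiny451th/JOOD | utils/strings.py | interleave_words_vertically
-- ===== SOURCE A (Python) =====
-- def interleave_words_vertically(word1, word2):
--     # Determine the length of the longer word
--     max_len = max(len(word1), len(word2))
--
--     # Initialize an empty list to store the combined result
--     combined = []
--
--     # Iterate through the range of the maximum length
--     for i in range(max_len):
--         # Append the character from word1 if it exists, otherwise append nothing
--         if i < len(word1):
--             combined.append(word1[i])
--         # Append the character from word2 if it exists, otherwise append nothing
--         if i < len(word2):
--             combined.append(word2[i])
--
--     # Join the combined list with newlines for vertical concatenation
--     result = "\n"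
--     result += "\n".join(combined)
--
--     return result
-- ===== SOURCE B (Python) =====
-- def interleave_words_vertically(word1, word2):
--     # Phase 1: parallel zip over the common prefix, phase 2: tail of the longer word.
--     chars = []
--     for a, b in zip(word1, word2):
--         chars.append(a)
--         chars.append(b)
--     m = min(len(word1), len(word2))
--     tail = word1[m:] if len(word1) > len(word2) else word2[m:]
--     for c in tail:
--         chars.append(c)
--     return "\n" + "\n".join(chars)
-- ===== Notes on version B (the rewrite author's own statement) =====
-- stated objective: idiomatic
-- what changed: Replaced the single index loop over range(max_len) with two check-free passes: a zip over the common prefix followed by appending the longer word's tail slice; this drops the two per-index bounds checks and indexing.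
import Mathlib
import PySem

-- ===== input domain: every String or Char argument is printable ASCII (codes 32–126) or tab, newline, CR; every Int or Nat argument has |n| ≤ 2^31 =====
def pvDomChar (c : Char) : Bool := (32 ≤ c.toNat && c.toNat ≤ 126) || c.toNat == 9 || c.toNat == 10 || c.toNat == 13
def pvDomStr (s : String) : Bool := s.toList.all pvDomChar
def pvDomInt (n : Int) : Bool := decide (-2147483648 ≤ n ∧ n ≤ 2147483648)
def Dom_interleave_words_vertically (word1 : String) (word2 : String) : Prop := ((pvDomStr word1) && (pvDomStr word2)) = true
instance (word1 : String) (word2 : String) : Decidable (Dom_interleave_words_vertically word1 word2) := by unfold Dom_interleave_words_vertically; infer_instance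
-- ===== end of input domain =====

-- B replaces A's index loop over range(max_len) with a zip over the common prefix plus the
-- longer word's tail; idiomatic, same cost, return value proved identical.

-- ===== PORT A =====
-- single loop over range(max_len) with two bounds checks per index
def interleave_words_vertically (word1 : String) (word2 : String) : String :=
  let w1 := word1.toList
  let w2 := word2.toList
  let maxLen : Int := max (w1.length : Int) (w2.length : Int)
  let combined : List Char :=
    (PySem.List.pyRange 0 maxLen 1).foldl (fun acc i =>
      let acc := if i < (w1.length : Int) then acc ++ [PySem.List.pyGetD w1 i ' '] else acc
      if i < (w2.length : Int) then acc ++ [PySem.List.pyGetD w2 i ' '] else acc) []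
  String.ofList ('\n' :: PySem.Chars.join ['\n'] (combined.map (fun c => [c])))

-- ===== PORT B =====
-- zip over the common prefix, then the tail of the longer word
def interleave_words_vertically_alt (word1 : String) (word2 : String) : String :=
  let w1 := word1.toList
  let w2 := word2.toList
  let chars : List Char := (w1.zip w2).foldl (fun acc p => acc ++ [p.1, p.2]) []
  let m : Nat := min w1.length w2.length
  let tail : List Char := if w1.length > w2.length then w1.drop m else w2.drop m
  let chars := tail.foldl (fun acc c => acc ++ [c]) chars
  String.ofList ('\n' :: PySem.Chars.join ['\n'] (chars.map (fun c => [c])))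

-- ===== PRECONDITION & SPEC =====
def Spec_interleave_words_vertically (word1 : String) (word2 : String) (out : String) : Prop := out = interleave_words_vertically_alt word1 word2
instance (word1 : String) (word2 : String) (out : String) : Decidable (Spec_interleave_words_vertically word1 word2 out) := by unfold Spec_interleave_words_vertically; infer_instance

-- ===== CLAIM (what is proved, stated in full; the proofs are below) =====
def Claim_equal_interleave_words_vertically : Prop := ∀ (word1 : String) (word2 : String), Dom_interleave_words_vertically word1 word2 → Spec_interleave_words_vertically word1 word2 (interleave_words_vertically word1 word2)

-- ===== LEMMAS AND PROOFS =====

-- reference interleaving both loop bodies are proved equal to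
def pvInter : List Char → List Char → List Char
  | [], ys => ys
  | x :: xs, [] => x :: xs
  | x :: xs, y :: ys => x :: y :: pvInter xs ys

theorem pvFoldlCongr {α β : Type} (f g : α → β → α) (l : List β) (init : α)
    (h : ∀ a b, f a b = g a b) : l.foldl f init = l.foldl g init := by
  induction l generalizing init <;> simp_all [List.foldl]

theorem pvFlat (l : List Char) : (l.map (fun c => [c])).flatten = l := by
  induction l <;> simp_all

-- A's loop body over Nat indices (after pyRange 0 n 1 is rewritten to List.range)
def pvBodyA (w1 w2 : List Char) (acc : List Char) (k : Nat) : List Char :=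
  let acc := if (k : Int) < (w1.length : Int) then acc ++ [w1.getD k ' '] else acc
  if (k : Int) < (w2.length : Int) then acc ++ [w2.getD k ' '] else acc

theorem pvFoldA (w1 w2 : List Char) (acc : List Char) :
    (List.range (max w1.length w2.length)).foldl (pvBodyA w1 w2) acc
      = acc ++ pvInter w1 w2 := by
  induction w1 generalizing w2 acc with
  | nil =>
    induction w2 generalizing acc with
    | nil => simp [pvInter]
    | cons b bs ihb =>
      rw [show max ([] : List Char).length (b :: bs).length = (max ([] : List Char).length bs.length) + 1 by
        simp]
      rw [List.range_succ_eq_map, List.foldl_cons, List.foldl_map]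
      have hstep : pvBodyA [] (b :: bs) acc 0 = acc ++ [b] := by
        simp [pvBodyA, List.getD]
      rw [hstep]
      have hcongr : ∀ (a : List Char) (k : Nat),
          pvBodyA [] (b :: bs) a (Nat.succ k) = pvBodyA [] bs a k := by
        intro a k
        simp [pvBodyA, List.getD, show ¬((k:Int)+1<0) by omega, show ¬((k:Int)<0) by omega]
      calc (List.range (max ([] : List Char).length bs.length)).foldl
              (fun a k => pvBodyA [] (b :: bs) a (Nat.succ k)) (acc ++ [b])
          = (List.range (max ([] : List Char).length bs.length)).foldl
              (pvBodyA [] bs) (acc ++ [b]) := by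
            exact pvFoldlCongr _ _ _ _ hcongr
        _ = acc ++ [b] ++ pvInter [] bs := ihb (acc ++ [b])
        _ = acc ++ pvInter [] (b :: bs) := by simp [pvInter]
  | cons a as iha =>
    cases w2 with
    | nil =>
      rw [show max (a :: as).length ([] : List Char).length = (max as.length ([] : List Char).length) + 1 by
        simp]
      rw [List.range_succ_eq_map, List.foldl_cons, List.foldl_map]
      have hstep : pvBodyA (a :: as) [] acc 0 = acc ++ [a] := by
        simp [pvBodyA, List.getD]
      rw [hstep]
      have hcongr : ∀ (x : List Char) (k : Nat),
          pvBodyA (a :: as) [] x (Nat.succ k) = pvBodyA as [] x k := by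
        intro x k
        simp [pvBodyA, List.getD, show ¬((k:Int)+1<0) by omega, show ¬((k:Int)<0) by omega]
      calc (List.range (max as.length ([] : List Char).length)).foldl
              (fun x k => pvBodyA (a :: as) [] x (Nat.succ k)) (acc ++ [a])
          = (List.range (max as.length ([] : List Char).length)).foldl
              (pvBodyA as []) (acc ++ [a]) := by
            exact pvFoldlCongr _ _ _ _ hcongr
        _ = acc ++ [a] ++ pvInter as [] := iha [] (acc ++ [a])
        _ = acc ++ pvInter (a :: as) [] := by cases as <;> simp [pvInter]
    | cons b bs =>
      rw [show max (a :: as).length (b :: bs).length = (max as.length bs.length) + 1 by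
        simp [Nat.succ_max_succ]]
      rw [List.range_succ_eq_map, List.foldl_cons, List.foldl_map]
      have hstep : pvBodyA (a :: as) (b :: bs) acc 0 = acc ++ [a, b] := by
        simp [pvBodyA, List.getD]
      rw [hstep]
      have hcongr : ∀ (x : List Char) (k : Nat),
          pvBodyA (a :: as) (b :: bs) x (Nat.succ k) = pvBodyA as bs x k := by
        intro x k
        simp [pvBodyA, List.getD]
      calc (List.range (max as.length bs.length)).foldl
              (fun x k => pvBodyA (a :: as) (b :: bs) x (Nat.succ k)) (acc ++ [a, b])
          = (List.range (max as.length bs.length)).foldl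
              (pvBodyA as bs) (acc ++ [a, b]) := by
            exact pvFoldlCongr _ _ _ _ hcongr
        _ = acc ++ [a, b] ++ pvInter as bs := iha bs (acc ++ [a, b])
        _ = acc ++ pvInter (a :: as) (b :: bs) := by simp [pvInter]

-- B's two-phase computation equals the same interleaving
theorem pvFoldB (w1 w2 : List Char) (acc : List Char) :
    (if w1.length > w2.length then w1.drop (min w1.length w2.length)
     else w2.drop (min w1.length w2.length)).foldl (fun a c => a ++ [c])
      ((w1.zip w2).foldl (fun a p => a ++ [p.1, p.2]) acc)
    = acc ++ pvInter w1 w2 := by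
  induction w1 generalizing w2 acc with
  | nil => simp [pvInter, pvFlat]
  | cons a as iha =>
    cases w2 with
    | nil => simp [pvInter, pvFlat]
    | cons b bs =>
      have hmin : min (a :: as).length (b :: bs).length = (min as.length bs.length) + 1 := by
        simp [Nat.succ_min_succ]
      rw [List.zip_cons_cons, List.foldl_cons, hmin]
      simp only [List.drop_succ_cons, List.length_cons, gt_iff_lt, Nat.add_lt_add_iff_right]
      have := iha bs (acc ++ [(a, b).1, (a, b).2])
      simpa [pvInter, gt_iff_lt, List.append_assoc] using this

theorem interleave_eq (word1 word2 : String) :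
    interleave_words_vertically word1 word2 = interleave_words_vertically_alt word1 word2 := by
  unfold interleave_words_vertically interleave_words_vertically_alt
  have hA : ∀ w1 w2 : List Char,
      (PySem.List.pyRange 0 (max (w1.length : Int) (w2.length : Int)) 1).foldl (fun acc i =>
        let acc := if i < (w1.length : Int) then acc ++ [PySem.List.pyGetD w1 i ' '] else acc
        if i < (w2.length : Int) then acc ++ [PySem.List.pyGetD w2 i ' '] else acc) []
      = pvInter w1 w2 := by
    intro w1 w2
    have hmax : max (w1.length : Int) (w2.length : Int) = ((max w1.length w2.length : Nat) : Int) := by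
      push_cast; rfl
    rw [hmax, PySem.List.pyRange_zero_nat, List.foldl_map]
    have hbody : ∀ (acc : List Char) (k : Nat),
        (fun acc (i : Int) =>
          let acc := if i < (w1.length : Int) then acc ++ [PySem.List.pyGetD w1 i ' '] else acc
          if i < (w2.length : Int) then acc ++ [PySem.List.pyGetD w2 i ' '] else acc) acc (k : Nat)
        = pvBodyA w1 w2 acc k := by
      intro acc k
      simp [pvBodyA, PySem.List.pyGetD_natCast]
    calc (List.range (max w1.length w2.length)).foldl
            (fun acc (k : Nat) =>
              (fun acc (i : Int) =>
                let acc := if i < (w1.length : Int) then acc ++ [PySem.List.pyGetD w1 i ' '] else acc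
                if i < (w2.length : Int) then acc ++ [PySem.List.pyGetD w2 i ' '] else acc) acc (k : Nat)) []
        = (List.range (max w1.length w2.length)).foldl (pvBodyA w1 w2) [] :=
          pvFoldlCongr _ _ _ _ hbody
      _ = pvInter w1 w2 := by rw [pvFoldA]; simp
  have hB := pvFoldB word1.toList word2.toList []
  simp only [hA, hB, List.nil_append]

-- ===== VERDICT (by name: the statement is the Claim_ definition above) =====
theorem interleave_words_vertically_spec : Claim_equal_interleave_words_vertically := by
  intro w1 w2 _
  unfold Spec_interleave_words_vertically
  exact interleave_eq w1 w2
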